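-- pv_equiv track=rewrite | github.com/dictation-toolbox/dragonfly-scripts | lib/grid_base_x.py | _calculate_one_axis
-- ===== SOURCE A (Python) =====
-- def _calculate_one_axis(step, columns, diff):
--     axis = []
--     addTo = 0
--     for value in range(0, step * (columns + 1), step):
--         value += addTo
--         axis.append(value)
--         if diff > 0:
--             addTo += 1
--             diff -= 1
--     return axis
-- ===== SOURCE B (Python) =====
-- def _calculate_one_axis(step, columns, diff):
--     bump = max(diff, 0)
--     return [base + min(i, bump)
--             for i, base in enumerate(range(0, step * (columns + 1), step))]
-- ===== Notes on version B (the rewrite author's own statement) =====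
-- stated objective: simpler
-- what changed: Replaces the running accumulator (addTo/diff mutated per iteration) with a closed-form per-element offset min(i, max(diff,0)) computed in a single comprehension over enumerate(range(...)).
import Mathlib
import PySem

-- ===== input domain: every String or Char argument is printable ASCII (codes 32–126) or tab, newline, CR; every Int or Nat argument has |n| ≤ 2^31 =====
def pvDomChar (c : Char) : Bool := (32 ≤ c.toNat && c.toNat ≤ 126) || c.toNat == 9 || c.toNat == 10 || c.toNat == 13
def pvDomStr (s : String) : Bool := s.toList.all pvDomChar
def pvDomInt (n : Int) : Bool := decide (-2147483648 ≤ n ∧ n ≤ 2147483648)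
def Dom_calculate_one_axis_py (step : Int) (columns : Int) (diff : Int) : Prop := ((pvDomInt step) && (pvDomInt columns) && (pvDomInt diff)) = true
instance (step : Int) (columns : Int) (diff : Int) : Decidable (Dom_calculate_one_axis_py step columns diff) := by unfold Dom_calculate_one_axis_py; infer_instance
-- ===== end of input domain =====

-- B computes each element by a closed form (step*i + min(i, max(diff,0)) via enumerate) instead of A's running accumulator: simpler, same cost.

-- ===== PORT A =====
def calcAxisLoop : List Int → List Int → Int → Int → List Int
  | [], axis, _, _ => axis
  | v :: rest, axis, addTo, diff =>
    let value := v + addTo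
    let axis' := axis ++ [value]
    if diff > 0 then calcAxisLoop rest axis' (addTo + 1) (diff - 1)
    else calcAxisLoop rest axis' addTo diff

def calculate_one_axis_py (step : Int) (columns : Int) (diff : Int) : List Int :=
  calcAxisLoop (PySem.List.pyRange 0 (step * (columns + 1)) step) [] 0 diff

-- ===== PORT B =====
def calculate_one_axis_py_alt (step : Int) (columns : Int) (diff : Int) : List Int :=
  let bump := max diff 0
  (PySem.List.enumerate (PySem.List.pyRange 0 (step * (columns + 1)) step) 0).map
    (fun p => p.2 + min p.1 bump)

-- ===== PRECONDITION & SPEC =====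
-- Pre_ excludes step = 0, where Python's range(0, _, 0) raises ValueError.
def Pre_calculate_one_axis_py (step : Int) (columns : Int) (diff : Int) : Prop := step ≠ 0
instance (step : Int) (columns : Int) (diff : Int) : Decidable (Pre_calculate_one_axis_py step columns diff) := by unfold Pre_calculate_one_axis_py; infer_instance
def pvWitness_calculate_one_axis_py : Int × Int × Int := (3, 4, 2)

def Spec_calculate_one_axis_py (step : Int) (columns : Int) (diff : Int) (out : List Int) : Prop := out = calculate_one_axis_py_alt step columns diff
instance (step : Int) (columns : Int) (diff : Int) (out : List Int) : Decidable (Spec_calculate_one_axis_py step columns diff out) := by unfold Spec_calculate_one_axis_py; infer_instance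

-- ===== CLAIM (what is proved, stated in full; the proofs are below) =====
def Claim_equal_calculate_one_axis_py : Prop := ∀ (step : Int) (columns : Int) (diff : Int), Dom_calculate_one_axis_py step columns diff → Pre_calculate_one_axis_py step columns diff → Spec_calculate_one_axis_py step columns diff (calculate_one_axis_py step columns diff)

-- ===== LEMMAS AND PROOFS =====

theorem fst_ge_of_mem_enumerate {α : Type} {xs : List α} {s : Int} {p : Int × α}
    (h : p ∈ PySem.List.enumerate xs s) : s ≤ p.1 := by
  rcases (PySem.List.mem_enumerate_iff xs s p).1 h with ⟨k, hk, rfl⟩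
  simp

theorem calcAxisLoop_eq (r : List Int) : ∀ (acc : List Int) (s a d : Int),
    calcAxisLoop r acc a d =
      acc ++ (PySem.List.enumerate r s).map (fun p => p.2 + a + min (p.1 - s) (max d 0)) := by
  induction r with
  | nil => intro acc s a d; simp [calcAxisLoop, PySem.List.enumerate_nil]
  | cons v rest ih =>
    intro acc s a d
    rw [PySem.List.enumerate_cons]
    by_cases hd : d > 0
    · simp only [calcAxisLoop, hd, if_pos, List.map_cons]
      rw [ih (acc ++ [v + a]) (s + 1) (a + 1) (d - 1)]
      have hmap : (PySem.List.enumerate rest (s + 1)).map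
            (fun p => p.2 + (a + 1) + min (p.1 - (s + 1)) (max (d - 1) 0)) =
          (PySem.List.enumerate rest (s + 1)).map
            (fun p => p.2 + a + min (p.1 - s) (max d 0)) := by
        apply List.map_congr_left
        intro p hp
        have := fst_ge_of_mem_enumerate hp
        omega
      rw [hmap]
      have hhead : v + a + min (s - s) (max d 0) = v + a := by omega
      simp only [hhead, List.append_assoc, List.singleton_append]
    · simp only [calcAxisLoop, hd, if_neg, List.map_cons, not_false_iff]
      rw [ih (acc ++ [v + a]) (s + 1) a d]
      have hmap : (PySem.List.enumerate rest (s + 1)).map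
            (fun p => p.2 + a + min (p.1 - (s + 1)) (max d 0)) =
          (PySem.List.enumerate rest (s + 1)).map
            (fun p => p.2 + a + min (p.1 - s) (max d 0)) := by
        apply List.map_congr_left
        intro p hp
        have := fst_ge_of_mem_enumerate hp
        omega
      rw [hmap]
      have hhead : v + a + min (s - s) (max d 0) = v + a := by omega
      simp only [hhead, List.append_assoc, List.singleton_append]

-- ===== VERDICT (by name: the statement is the Claim_ definition above) =====
theorem calculate_one_axis_py_spec : Claim_equal_calculate_one_axis_py := by
  intro step columns diff _ _
  unfold Spec_calculate_one_axis_py calculate_one_axis_py calculate_one_axis_py_alt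
  rw [calcAxisLoop_eq _ [] 0 0 diff]
  simp only [List.nil_append]
  apply List.map_congr_left
  intro p _
  omega
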